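-- pv_equiv track=rewrite | github.com/joao-conde/foobar | solutions/running-with-bunnies.py | path_time
-- ===== SOURCE A (Python) =====
-- def path_time(path, distances):
--     # add times for the transitions from the start
--     # to the first bunny and from the last to the bulkhead
--     first_bunny, last_bunny = path[0], path[-1]
--     start, bulkhead = 0, len(distances) - 1
--     time = distances[start][first_bunny] + distances[last_bunny][bulkhead]
--
--     # add the times of jumping from bunny to bunny
--     for i in range(1, len(path)):
--         src, dst = path[i - 1], path[i]
--         time += distances[src][dst]
--
--     return time
-- ===== SOURCE B (Python) =====
-- def path_time(path, distances):
--     # Recursive walk carrying the current node; the base case pays the final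
--     # hop to the bulkhead. Starts at node 0 and consumes the path front-first.
--     def go(prev, rest):
--         if not rest:
--             return distances[prev][len(distances) - 1]
--         return distances[prev][rest[0]] + go(rest[0], rest[1:])
--     return go(0, list(path))
-- ===== Notes on version B (the rewrite author's own statement) =====
-- stated objective: alternative
-- what changed: B replaces A's two endpoint terms plus an index loop with a recursive walk that carries the current node and pays each hop (and the final hop to the bulkhead in the base case) as it consumes the path.
import Mathlib
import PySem

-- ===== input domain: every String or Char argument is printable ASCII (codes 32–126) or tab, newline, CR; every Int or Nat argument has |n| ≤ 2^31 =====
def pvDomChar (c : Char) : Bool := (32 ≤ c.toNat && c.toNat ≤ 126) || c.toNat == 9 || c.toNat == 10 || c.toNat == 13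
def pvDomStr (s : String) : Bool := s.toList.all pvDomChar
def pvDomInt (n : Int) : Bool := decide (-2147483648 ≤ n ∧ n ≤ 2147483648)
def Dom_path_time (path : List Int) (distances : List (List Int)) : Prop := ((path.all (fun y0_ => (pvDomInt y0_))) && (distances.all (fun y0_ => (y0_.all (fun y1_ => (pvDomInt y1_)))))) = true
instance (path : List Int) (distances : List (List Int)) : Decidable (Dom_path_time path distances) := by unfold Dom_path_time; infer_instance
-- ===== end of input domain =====

-- B walks the path recursively carrying the current node, paying each hop as it goes and the
-- final hop to the bulkhead in the base case; A's two endpoint terms + index loop disappear.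
-- Return values proved equal on Pre_ (the inputs where the Python A returns normally).

-- ===== PORT A =====
def path_time (path : List Int) (distances : List (List Int)) : Int :=
  let first_bunny := PySem.List.pyGetD path 0 0
  let last_bunny := PySem.List.pyGetD path (-1) 0
  let start : Int := 0
  let bulkhead : Int := (distances.length : Int) - 1
  let time := PySem.List.pyGetD (PySem.List.pyGetD distances start []) first_bunny 0
            + PySem.List.pyGetD (PySem.List.pyGetD distances last_bunny []) bulkhead 0
  (PySem.List.pyRange 1 (path.length : Int) 1).foldl
    (fun time i =>
      time + PySem.List.pyGetD (PySem.List.pyGetD distances (PySem.List.pyGetD path (i - 1) 0) [])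
               (PySem.List.pyGetD path i 0) 0)
    time

-- ===== PORT B =====
-- the inner recursive helper 'go' of Source B
def path_time_go (distances : List (List Int)) (prev : Int) (rest : List Int) : Int :=
  match rest with
  | [] => PySem.List.pyGetD (PySem.List.pyGetD distances prev []) ((distances.length : Int) - 1) 0
  | x :: r =>
      PySem.List.pyGetD (PySem.List.pyGetD distances prev []) x 0 + path_time_go distances x r

def path_time_alt (path : List Int) (distances : List (List Int)) : Int :=
  path_time_go distances 0 path

-- ===== PRECONDITION & SPEC =====
-- Pre_ excludes exactly the inputs where Python A raises IndexError: an empty path, or a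
-- route step distances[a][b] (including the start and bulkhead steps) that is out of range.
def Pre_path_time (path : List Int) (distances : List (List Int)) : Prop :=
  path ≠ [] ∧
  ∀ ab ∈ (0 :: path ++ [(distances.length : Int) - 1]).zip
           ((path ++ [(distances.length : Int) - 1])),
    PySem.Raise.InRange distances.length ab.1 ∧
    PySem.Raise.InRange (PySem.List.pyGetD distances ab.1 []).length ab.2
instance (path : List Int) (distances : List (List Int)) : Decidable (Pre_path_time path distances) := by
  unfold Pre_path_time; infer_instance

def pvWitness_path_time : List Int × List (List Int) := ([1], [[0,3,9],[4,0,7],[2,6,0]])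

def Spec_path_time (path : List Int) (distances : List (List Int)) (out : Int) : Prop := out = path_time_alt path distances
instance (path : List Int) (distances : List (List Int)) (out : Int) : Decidable (Spec_path_time path distances out) := by unfold Spec_path_time; infer_instance

-- ===== CLAIM (what is proved, stated in full; the proofs are below) =====
def Claim_equal_path_time : Prop := ∀ (path : List Int) (distances : List (List Int)), Dom_path_time path distances → Pre_path_time path distances → Spec_path_time path distances (path_time path distances)

-- ===== LEMMAS AND PROOFS =====

-- zip of a list appended with the bulkhead against its tail appended with the bulkhead:
-- the consecutive pairs of the list, then (last, bulkhead).
theorem zip_append_last (l : List Int) (p bk : Int) :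
    ((p :: l) ++ [bk]).zip (l ++ [bk]) = ((p :: l).zip l) ++ [((p :: l).getLast (by simp), bk)] := by
  induction l generalizing p with
  | nil => simp
  | cons q rest ih =>
      have h := ih q
      simp only [List.cons_append] at h ⊢
      rw [List.zip_cons_cons, h]
      simp [List.getLast]

-- A's middle loop equals the sum of g over consecutive pairs of path.
theorem midA (path : List Int) (t0 : Int) (g : Int → Int → Int) :
    (PySem.List.pyRange 1 (path.length : Int) 1).foldl
      (fun t i => t + g (PySem.List.pyGetD path (i - 1) 0) (PySem.List.pyGetD path i 0)) t0
    = t0 + ((path.zip (path.tail)).map (fun ab => g ab.1 ab.2)).sum := by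
  rw [PySem.List.pyRange_one, List.foldl_map]
  have hl : ((path.length : Int) - 1).toNat = path.length - 1 := by omega
  have hfun : (fun (t : Int) (k : Nat) =>
      t + g (PySem.List.pyGetD path (1 + (k : Int) - 1) 0) (PySem.List.pyGetD path (1 + (k : Int)) 0))
      = fun t k => t + g (path.getD k 0) (path.getD (k + 1) 0) := by
    funext t k
    have h1 : (1 : Int) + (k : Int) - 1 = (k : Int) := by ring
    have h2 : (1 : Int) + (k : Int) = ((k + 1 : Nat) : Int) := by push_cast; ring
    rw [h1, h2, PySem.List.pyGetD_natCast, PySem.List.pyGetD_natCast]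
  rw [hl, hfun, PySem.List.foldl_add]
  congr 1
  refine congrArg List.sum (List.ext_getElem ?_ ?_)
  · simp only [List.length_map, List.length_range, List.length_zip, List.length_tail]
    omega
  · intro k h1 h2
    simp only [List.length_map, List.length_range] at h1
    simp only [List.getElem_map, List.getElem_range, List.getElem_zip, List.getElem_tail]
    rw [List.getD_eq_getElem path 0 (by omega), List.getD_eq_getElem path 0 (by omega)]

-- B's recursion unfolds to the sum of g over the consecutive pairs of (prev :: l ++ [bulkhead]).
theorem goB_eq (distances : List (List Int)) (prev : Int) (l : List Int) :
    path_time_go distances prev l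
    = ((((prev :: l) ++ [(distances.length : Int) - 1]).zip (l ++ [(distances.length : Int) - 1])).map
        (fun ab => PySem.List.pyGetD (PySem.List.pyGetD distances ab.1 []) ab.2 0)).sum := by
  induction l generalizing prev with
  | nil => simp [path_time_go]
  | cons x r ih =>
      simp only [path_time_go, List.cons_append, List.zip_cons_cons, List.map_cons, List.sum_cons]
      rw [ih x, List.cons_append]

theorem path_time_spec : Claim_equal_path_time := by
  intro path distances _ hpre
  obtain ⟨hne, -⟩ := hpre
  show path_time path distances = path_time_alt path distances
  obtain ⟨p, l, rfl⟩ := List.exists_cons_of_ne_nil hne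
  simp only [path_time, path_time_alt]
  rw [midA (p :: l) _ (fun a b => PySem.List.pyGetD (PySem.List.pyGetD distances a []) b 0)]
  rw [path_time_go, goB_eq]
  have hz := zip_append_last l p ((distances.length : Int) - 1)
  simp only [List.cons_append] at hz ⊢
  rw [hz]
  rw [PySem.List.pyGetD_zero_cons, PySem.List.pyGetD_neg_one (p :: l) 0 hne]
  simp only [List.map_append, List.map_cons, List.map_nil, List.sum_append,
    List.sum_cons, List.sum_nil, List.tail_cons]
  ring
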